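-- pv_equiv track=rewrite | github.com/JamesHizon/SparkMP1 | Spark_AR_Mini_Project/Final_Autoinc_Spark.py | populate_make
-- ===== SOURCE A (Python) =====
-- def populate_make(values):
--     """
--     This function will be applied to a key-value pair.
--
--     Given a list of values, we will first sort the list,
--     initialize empty list for output, and then if the value is not empty,
--     we will create make and year values to be appended to output list
--     with the attached incident_type.
--
--     :param values: Values from key-value pair (applied after groupByKey).
--     :return: List of output
--     """
--     sorted(values)
--     # Initialize empty output list which will have make, year and incident_type.
--     output_value_list = []
--
--     # Iterate through each of the values
--     for val in values:
--         # Filter and append to output list if make and year values exist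
--         if val[0].strip() != '':
--             make = val[0]
--         if val[1].strip() != '':
--             year = val[1]
--         # Append values even if there exists no make and year
--         output_value_list.append((make, year, val[2]))
--
--     return output_value_list
-- ===== SOURCE B (Python) =====
-- def populate_make(values):
--     sorted(values)
--     # Forward-fill each column independently, then zip the columns back together.
--     makes = []
--     for val in values:
--         if val[0].strip() != '':
--             make = val[0]
--         makes.append(make)
--     years = []
--     for val in values:
--         if val[1].strip() != '':
--             year = val[1]
--         years.append(year)
--     return list(zip(makes, years, (val[2] for val in values)))
-- ===== Notes on version B (the rewrite author's own statement) =====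
-- stated objective: alternative
-- what changed: A's single fused carry-forward pass keeping both fields in one loop is replaced by two independent per-column forward-fill passes whose results are zipped with the incident column.
import Mathlib
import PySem

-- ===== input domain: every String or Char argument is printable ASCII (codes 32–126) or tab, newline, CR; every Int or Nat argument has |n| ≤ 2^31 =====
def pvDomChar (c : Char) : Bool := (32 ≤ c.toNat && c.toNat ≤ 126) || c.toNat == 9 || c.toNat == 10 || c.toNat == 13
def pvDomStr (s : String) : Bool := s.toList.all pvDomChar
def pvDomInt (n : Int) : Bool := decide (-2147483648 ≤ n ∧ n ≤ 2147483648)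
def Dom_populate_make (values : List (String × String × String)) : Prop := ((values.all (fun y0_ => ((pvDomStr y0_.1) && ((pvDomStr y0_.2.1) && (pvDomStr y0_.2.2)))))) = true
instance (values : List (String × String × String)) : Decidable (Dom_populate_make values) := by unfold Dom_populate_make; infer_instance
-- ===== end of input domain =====

-- B replaces A's single fused carry-forward pass by two independent per-column forward-fills zipped back together (objective: alternative decomposition, same cost).


-- ===== PORT A =====
-- A's loop: one pass carrying the last non-blank make and year together; an unbound
-- make/year (Python NameError, excluded by Pre_) is modelled as Option.none.
def populate_make_go (vals : List (String × String × String))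
    (make year : Option String) : List (String × String × String) :=
  match vals with
  | [] => []
  | (a, b, c) :: t =>
    let make' := if PySem.Str.strip a ≠ "" then some a else make
    let year' := if PySem.Str.strip b ≠ "" then some b else year
    (make'.getD "", year'.getD "", c) :: populate_make_go t make' year'

def populate_make (values : List (String × String × String)) : List (String × String × String) :=
  -- A's `sorted(values)` call is dead: its result is discarded, so it is not ported.
  populate_make_go values none none

-- ===== PORT B =====
-- B's per-column forward fill; an unbound carry variable (NameError, outside Pre_) is none.
def pm_fill (xs : List String) (cur : Option String) : List String :=
  match xs with
  | [] => []
  | x :: t =>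
    let cur' := if PySem.Str.strip x ≠ "" then some x else cur
    cur'.getD "" :: pm_fill t cur'

def populate_make_alt (values : List (String × String × String)) : List (String × String × String) :=
  -- B's dead `sorted(values)` call, kept to mirror A, is likewise not ported.
  let makes := pm_fill (values.map (·.1)) none
  let years := pm_fill (values.map (·.2.1)) none
  List.zipWith (fun m (yc : String × String) => (m, yc.1, yc.2))
    makes (List.zip years (values.map (·.2.2)))

-- ===== PRECONDITION & SPEC =====
-- Pre_ excludes exactly the inputs on which Python A raises NameError: a non-empty list
-- whose FIRST element has a blank (all-whitespace) make or year, so the carry variable is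
-- still unbound at the first append. (B raises NameError there too.)
def Pre_populate_make (values : List (String × String × String)) : Prop :=
  (match values with
   | [] => true
   | (a, b, _) :: _ => decide (PySem.Str.strip a ≠ "" ∧ PySem.Str.strip b ≠ "")) = true
instance (values : List (String × String × String)) : Decidable (Pre_populate_make values) := by
  unfold Pre_populate_make; infer_instance

def pvWitness_populate_make : (List (String × String × String)) :=
  [("Toyota", "2019", "accident"), ("", " ", "theft")]

def Spec_populate_make (values : List (String × String × String)) (out : List (String × String × String)) : Prop := out = populate_make_alt values
instance (values : List (String × String × String)) (out : List (String × String × String)) : Decidable (Spec_populate_make values out) := by unfold Spec_populate_make; infer_instance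

-- ===== CLAIM (what is proved, stated in full; the proofs are below) =====
def Claim_equal_populate_make : Prop := ∀ (values : List (String × String × String)), Dom_populate_make values → Pre_populate_make values → Spec_populate_make values (populate_make values)

-- ===== LEMMAS AND PROOFS =====

-- The fused pass equals the zip of the two per-column fills, for every carry state.
theorem populate_make_go_eq (vals : List (String × String × String))
    (m y : Option String) :
    populate_make_go vals m y =
      List.zipWith (fun mk (yc : String × String) => (mk, yc.1, yc.2))
        (pm_fill (vals.map (·.1)) m)
        (List.zip (pm_fill (vals.map (·.2.1)) y) (vals.map (·.2.2))) := by
  induction vals generalizing m y with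
  | nil => rfl
  | cons hd t ih =>
    obtain ⟨a, b, c⟩ := hd
    simp only [populate_make_go, pm_fill, List.map_cons, List.zip_cons_cons,
      List.zipWith_cons_cons]
    exact congrArg _ (ih _ _)

-- ===== VERDICT (by name: the statement is the Claim_ definition above) =====
theorem populate_make_spec : Claim_equal_populate_make := by
  intro values _ _
  unfold Spec_populate_make populate_make populate_make_alt
  exact populate_make_go_eq values none none
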